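-- pv_equiv track=rewrite | github.com/Yasushi-Ohsugi/master_as_of_20240610 | PySI_E2E_eval_vscode_test240527_master.py | check_lv_week_fw
-- ===== SOURCE A (Python) =====
-- def check_lv_week_fw(const_lst, check_week):
--
--     num = check_week
--
--     if const_lst == []:
--
--         pass
--
--     else:
--
--         while num in const_lst:
--
--             num += 1
--
--     return num
-- ===== SOURCE B (Python) =====
-- def check_lv_week_fw(const_lst, check_week):
--     num = check_week
--     for x in sorted(const_lst):
--         if x < num:
--             continue
--         if x == num:
--             num += 1
--         else:
--             break
--     return num
-- ===== Notes on version B (the rewrite author's own statement) =====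
-- stated objective: alternative
-- what changed: Replaced the while-loop of repeated whole-list membership scans with sort-once-then-one-ascending-pass (increment num when the current sorted element equals it, stop once one exceeds it), trading repeated O(n) scans for one O(n log n) sort.
import Mathlib
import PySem

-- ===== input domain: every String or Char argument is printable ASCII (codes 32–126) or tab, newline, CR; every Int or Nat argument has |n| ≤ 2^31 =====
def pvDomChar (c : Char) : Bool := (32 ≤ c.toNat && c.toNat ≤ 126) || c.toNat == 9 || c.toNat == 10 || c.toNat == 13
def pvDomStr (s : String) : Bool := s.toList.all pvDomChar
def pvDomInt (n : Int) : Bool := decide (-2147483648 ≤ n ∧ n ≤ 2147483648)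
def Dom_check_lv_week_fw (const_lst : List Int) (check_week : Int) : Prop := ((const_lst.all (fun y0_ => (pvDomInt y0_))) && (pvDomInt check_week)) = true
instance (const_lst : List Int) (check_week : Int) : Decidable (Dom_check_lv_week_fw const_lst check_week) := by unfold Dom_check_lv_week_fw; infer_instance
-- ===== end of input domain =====

-- B sorts the list once and walks it in one ascending pass instead of A's repeated whole-list membership scans (objective: alternative decomposition).

-- ===== PORT A =====
-- termination measure for A's while-loop: the number of elements ≥ num strictly drops each iteration
theorem pvFilterDrop (l : List Int) (num : Int) (h : num ∈ l) :
    (l.filter (fun x => num + 1 ≤ x)).length < (l.filter (fun x => num ≤ x)).length := by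
  induction l with
  | nil => cases h
  | cons a t ih =>
    have hmono : (t.filter (fun x => decide (num + 1 ≤ x))).length ≤ (t.filter (fun x => decide (num ≤ x))).length :=
      (List.monotone_filter_right t (fun x hx => by simp only [decide_eq_true_eq] at *; omega)).length_le
    simp only [List.filter_cons]
    rcases List.mem_cons.mp h with rfl | ht
    · rw [if_neg (by simp only [decide_eq_true_eq]; omega), if_pos (by simp)]
      simp only [List.length_cons]
      omega
    · have hih := ih ht
      by_cases h1 : num + 1 ≤ a
      · rw [if_pos (by simpa using h1), if_pos (by simp only [decide_eq_true_eq]; omega)]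
        simp only [List.length_cons]
        omega
      · by_cases h2 : num ≤ a
        · rw [if_neg (by simpa using h1), if_pos (by simpa using h2)]
          simp only [List.length_cons]
          omega
        · rw [if_neg (by simpa using h1), if_neg (by simpa using h2)]
          omega

-- 'while num in const_lst: num += 1'
def pvLoopA (l : List Int) (num : Int) : Int :=
  if num ∈ l then pvLoopA l (num + 1) else num
termination_by (l.filter (fun x => num ≤ x)).length
decreasing_by exact pvFilterDrop l num (by assumption)

def check_lv_week_fw (const_lst : List Int) (check_week : Int) : Int :=
  if const_lst = [] then check_week
  else pvLoopA const_lst check_week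

-- ===== PORT B =====
-- the for-loop over sorted(const_lst): skip x < num, bump on x = num, break on x > num
def pvWalkB : List Int → Int → Int
  | [], num => num
  | x :: rest, num =>
    if x < num then pvWalkB rest num
    else if x = num then pvWalkB rest (num + 1)
    else num

def check_lv_week_fw_alt (const_lst : List Int) (check_week : Int) : Int :=
  pvWalkB (PySem.List.sorted const_lst (fun x => x) false) check_week

-- ===== PRECONDITION & SPEC =====
def Spec_check_lv_week_fw (const_lst : List Int) (check_week : Int) (out : Int) : Prop := out = check_lv_week_fw_alt const_lst check_week
instance (const_lst : List Int) (check_week : Int) (out : Int) : Decidable (Spec_check_lv_week_fw const_lst check_week out) := by unfold Spec_check_lv_week_fw; infer_instance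

-- ===== CLAIM (what is proved, stated in full; the proofs are below) =====
def Claim_equal_check_lv_week_fw : Prop := ∀ (const_lst : List Int) (check_week : Int), Dom_check_lv_week_fw const_lst check_week → Spec_check_lv_week_fw const_lst check_week (check_lv_week_fw const_lst check_week)

-- ===== LEMMAS AND PROOFS =====

-- both programs return the unique m ≥ num with m ∉ l such that every k in [num, m) is in l
def pvP (l : List Int) (num m : Int) : Prop :=
  num ≤ m ∧ m ∉ l ∧ ∀ k, num ≤ k → k < m → k ∈ l

theorem pvP_unique {l : List Int} {num m1 m2 : Int} (h1 : pvP l num m1) (h2 : pvP l num m2) : m1 = m2 := by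
  obtain ⟨a1, b1, c1⟩ := h1
  obtain ⟨a2, b2, c2⟩ := h2
  by_contra hne
  rcases lt_or_gt_of_ne hne with h | h
  · exact b1 (c2 m1 a1 h)
  · exact b2 (c1 m2 a2 h)

theorem pvLoopA_P (l : List Int) (num : Int) : pvP l num (pvLoopA l num) := by
  rw [pvLoopA]
  by_cases h : num ∈ l
  · simp only [h, if_true]
    obtain ⟨a, b, c⟩ := pvLoopA_P l (num + 1)
    exact ⟨by omega, b, fun k hk1 hk2 => by
      by_cases hk : k = num
      · exact hk ▸ h
      · exact c k (by omega) hk2⟩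
  · simp only [h, if_false]
    exact ⟨le_refl _, h, fun k hk1 hk2 => absurd (lt_of_le_of_lt hk1 hk2) (lt_irrefl _)⟩
termination_by (l.filter (fun x => num ≤ x)).length
decreasing_by exact pvFilterDrop l num (by assumption)

theorem pvWalkB_P (s : List Int) (num : Int) (hs : s.Pairwise (· ≤ ·)) : pvP s num (pvWalkB s num) := by
  induction s generalizing num with
  | nil => exact ⟨le_refl _, by simp, fun k hk1 hk2 => absurd (lt_of_le_of_lt hk1 hk2) (lt_irrefl _)⟩
  | cons x rest ih =>
    have hrest : rest.Pairwise (· ≤ ·) := (List.pairwise_cons.mp hs).2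
    have hall : ∀ y ∈ rest, x ≤ y := (List.pairwise_cons.mp hs).1
    simp only [pvWalkB]
    by_cases h1 : x < num
    · simp only [h1, if_true]
      obtain ⟨a, b, c⟩ := ih num hrest
      refine ⟨a, ?_, fun k hk1 hk2 => List.mem_cons_of_mem _ (c k hk1 hk2)⟩
      intro hm
      rcases List.mem_cons.mp hm with rfl | hm
      · omega
      · exact b hm
    · simp only [h1, if_false]
      by_cases h2 : x = num
      · simp only [h2, if_true]
        obtain ⟨a, b, c⟩ := ih (num + 1) hrest
        refine ⟨by omega, ?_, fun k hk1 hk2 => ?_⟩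
        · intro hm
          rcases List.mem_cons.mp hm with heq | hm
          · omega
          · exact b hm
        · by_cases hk : k = num
          · rw [hk, ← h2]; exact List.mem_cons_self
          · exact List.mem_cons_of_mem _ (c k (by omega) hk2)
      · simp only [h2, if_false]
        refine ⟨le_refl _, ?_, fun k hk1 hk2 => absurd (lt_of_le_of_lt hk1 hk2) (lt_irrefl _)⟩
        intro hm
        rcases List.mem_cons.mp hm with rfl | hm
        · omega
        · have := hall _ hm; omega

theorem pvP_congr_mem {l1 l2 : List Int} {num m : Int} (hmem : ∀ x, x ∈ l1 ↔ x ∈ l2)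
    (h : pvP l1 num m) : pvP l2 num m := by
  obtain ⟨a, b, c⟩ := h
  exact ⟨a, fun hm => b ((hmem m).mpr hm), fun k hk1 hk2 => (hmem k).mp (c k hk1 hk2)⟩

-- ===== VERDICT (by name: the statement is the Claim_ definition above) =====
theorem check_lv_week_fw_spec : Claim_equal_check_lv_week_fw := by
  intro l cw _
  unfold Spec_check_lv_week_fw check_lv_week_fw check_lv_week_fw_alt
  have hs := pvWalkB_P (PySem.List.sorted l (fun x => x) false) cw
    (by simpa using PySem.List.sorted_pairwise (xs := l) (key := fun x => x))
  have hB : pvP l cw (pvWalkB (PySem.List.sorted l (fun x => x) false) cw) :=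
    pvP_congr_mem (fun x => PySem.List.mem_sorted _ _ _ _) hs
  by_cases h : l = []
  · subst h
    exact pvP_unique ⟨le_refl _, by simp, fun k hk1 hk2 => absurd (lt_of_le_of_lt hk1 hk2) (lt_irrefl _)⟩ hB
  · simp only [h, if_false]
    exact pvP_unique (pvLoopA_P l cw) hB
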